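-- pv_equiv track=rewrite | github.com/antonkrupin/algorithms | TransformTransform.py | TransformTransform
-- ===== SOURCE A (Python) =====
-- def TransformTransform(numbers, n):
--     transformNumbers = []
--     transformNumbers1 = []
--
--     for i in range(len(numbers)):
--         for j in range(0,len(numbers)-i-1):
--             k = i + j
--             if(len(numbers[j:k]) != 0):
--                 maxNumber = max(numbers[j:k])
--                 transformNumbers.append(maxNumber)
--
--     for i in range(len(transformNumbers)):
--         for j in range(0,len(transformNumbers)-i-1):
--             k = i + j
--             if(len(transformNumbers[j:k]) != 0):
--                 maxNumber = max(transformNumbers[j:k])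
--                 transformNumbers1.append(maxNumber)
--
--     if(sum(transformNumbers1)%2 == 0):
--         return True
--     else:
--         return False
-- ===== SOURCE B (Python) =====
-- def TransformTransform(numbers, n):
--     # DP over window lengths: maxima for length L+1 are pairwise maxima of the
--     # length-L row, so each nested slice-and-scan pass of A collapses to O(m^2).
--     def _transform(a):
--         out = []
--         win = list(a)  # maxima of all windows of length 1
--         for L in range(1, len(a) - 1):
--             out += win[:len(a) - L - 1]
--             win = [max(x, y) for x, y in zip(win, win[1:])]
--         return out
--     t = _transform(_transform(numbers))
--     return sum(t) % 2 == 0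
-- ===== Notes on version B (the rewrite author's own statement) =====
-- stated objective: faster
-- what changed: Replaces both nested slice-and-rescan maximum passes (max over a fresh slice for every (i,j)) by a dynamic program over window lengths: the row of maxima for length L+1 is the pairwise max of the length-L row, so each pass is quadratic in its input instead of cubic.
import Mathlib
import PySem

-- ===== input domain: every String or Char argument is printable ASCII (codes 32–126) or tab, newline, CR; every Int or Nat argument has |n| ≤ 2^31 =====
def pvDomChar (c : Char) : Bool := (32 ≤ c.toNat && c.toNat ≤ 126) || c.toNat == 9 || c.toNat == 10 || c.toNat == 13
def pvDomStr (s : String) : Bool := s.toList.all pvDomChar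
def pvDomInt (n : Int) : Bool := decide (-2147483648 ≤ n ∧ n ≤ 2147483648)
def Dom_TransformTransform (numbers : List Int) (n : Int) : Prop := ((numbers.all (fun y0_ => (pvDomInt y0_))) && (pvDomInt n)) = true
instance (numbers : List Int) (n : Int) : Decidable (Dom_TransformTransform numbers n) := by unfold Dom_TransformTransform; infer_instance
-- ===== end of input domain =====

-- B replaces A's nested slice-and-rescan maximum passes by a dynamic program over
-- window lengths (pairwise maxima of the previous row): objective = faster.

-- ===== PORT A =====
-- A's inner loop over j (slice, guard, append the slice's max).
def pvInnerA (a : List Int) (i : Int) (acc : List Int) : List Int :=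
  (PySem.List.pyRange 0 (PySem.List.len a - i - 1) 1).foldl (fun acc2 j =>
    let s := PySem.List.slice a (some j) (some (i + j))
    if PySem.List.len s ≠ 0 then
      acc2 ++ [(PySem.List.max? s (fun y => y)).getD 0]
    else acc2) acc

-- A contains this identical two-level loop nest twice (on `numbers`, then on its
-- output); pvTransA is that loop nest, transliterated once and applied twice.
def pvTransA (a : List Int) : List Int :=
  (PySem.List.pyRange 0 (PySem.List.len a) 1).foldl (fun acc i => pvInnerA a i acc) []

def TransformTransform (numbers : List Int) (n : Int) : Bool :=
  let transformNumbers := pvTransA numbers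
  let transformNumbers1 := pvTransA transformNumbers
  if PySem.Int.mod transformNumbers1.sum 2 == 0 then true else false

-- ===== PORT B =====
-- Source B's _transform: out += win[:len(a)-L-1]; win = [max(x,y) for x,y in zip(win, win[1:])].
def pvTransB (a : List Int) : List Int :=
  ((PySem.List.pyRange 1 (PySem.List.len a - 1) 1).foldl
    (fun (st : List Int × List Int) L =>
      (st.1 ++ PySem.List.slice st.2 none (some (PySem.List.len a - L - 1)),
       List.zipWith max st.2 (PySem.List.slice st.2 (some 1) none)))
    ([], a)).1

def TransformTransform_alt (numbers : List Int) (n : Int) : Bool :=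
  PySem.Int.mod (pvTransB (pvTransB numbers)).sum 2 == 0

-- ===== PRECONDITION & SPEC =====
def Spec_TransformTransform (numbers : List Int) (n : Int) (out : Bool) : Prop := out = TransformTransform_alt numbers n
instance (numbers : List Int) (n : Int) (out : Bool) : Decidable (Spec_TransformTransform numbers n out) := by unfold Spec_TransformTransform; infer_instance

-- ===== CLAIM (what is proved, stated in full; the proofs are below) =====
def Claim_equal_TransformTransform : Prop := ∀ (numbers : List Int) (n : Int), Dom_TransformTransform numbers n → Spec_TransformTransform numbers n (TransformTransform numbers n)

-- ===== LEMMAS AND PROOFS =====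

-- max of the window a[j : j+c+1], written as the running max Python's `max` performs.
def pvW (a : List Int) (c j : Nat) : Int :=
  ((a.drop (j + 1)).take c).foldl max (a.getD j 0)

-- the per-window-length segment a pass emits for window length i
def pvSeg (a : List Int) (i : Nat) : List Int :=
  if i = 0 then [] else (List.range (a.length - i - 1)).map (pvW a (i - 1))

-- what both passes compute
def pvSpecT (a : List Int) : List Int :=
  (List.range (a.length - 2)).flatMap (fun k =>
    (List.range (a.length - k - 2)).map (pvW a k))

theorem pvW_zero (a : List Int) (j : Nat) : pvW a 0 j = a.getD j 0 := by
  simp [pvW]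

theorem pvW_snoc (a : List Int) (c j : Nat) (h : j + c + 1 < a.length) :
    pvW a (c + 1) j = max (pvW a c j) (a.getD (j + c + 1) 0) := by
  have h1 : j + 1 + c < a.length := by omega
  simp only [pvW, List.take_succ, List.getElem?_drop,
    List.getElem?_eq_getElem h1, Option.toList_some, List.foldl_append,
    List.foldl_cons, List.foldl_nil]
  rw [List.getD_eq_getElem a 0 (by omega : j + c + 1 < a.length)]
  congr 2
  omega

theorem pvW_succ (a : List Int) (c j : Nat) (h : j + c + 1 < a.length) :
    pvW a (c + 1) j = max (pvW a c j) (pvW a c (j + 1)) := by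
  induction c generalizing j with
  | zero =>
    rw [pvW_snoc a 0 j (by omega)]
    simp [pvW_zero]
  | succ c ih =>
    rw [pvW_snoc a (c + 1) j (by omega)]
    rw [show pvW a (c + 1) (j + 1) = max (pvW a c (j + 1)) (a.getD (j + (c + 1) + 1) 0) by
      rw [pvW_snoc a c (j + 1) (by omega)]; congr 2; omega]
    rw [ih j (by omega)]
    generalize pvW a c j = X
    generalize pvW a c (j + 1) = Y
    generalize a.getD (j + (c + 1) + 1) 0 = g
    omega

-- the row of window maxima as B maintains it
theorem pvRow_step (a : List Int) (c : Nat) :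
    List.zipWith max ((List.range (a.length - c)).map (pvW a c))
      ((List.range (a.length - c)).map (pvW a c)).tail
      = (List.range (a.length - (c + 1))).map (pvW a (c + 1)) := by
  apply List.ext_getElem
  · simp [List.length_zipWith, List.length_tail]; omega
  · intro i h1 h2
    have hi : i < a.length - (c + 1) := by
      simp [List.length_zipWith, List.length_tail] at h1; omega
    simp only [List.getElem_zipWith, List.getElem_tail, List.getElem_map, List.getElem_range]
    rw [pvW_succ a c i (by omega)]

-- `a` is the row of its own length-1 window maxima
theorem pvRow_zero (a : List Int) :
    (List.range a.length).map (pvW a 0) = a := by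
  apply List.ext_getElem
  · simp
  · intro i h1 h2
    simp [pvW_zero, List.getElem?_eq_getElem h2]

-- a nonempty slice of A is the head-cons form Python's max folds over
theorem pvSlice_cons (a : List Int) (c j : Nat) (h : j + c < a.length) :
    (a.drop j).take (c + 1) = a.getD j 0 :: (a.drop (j + 1)).take c := by
  rw [List.drop_eq_getElem_cons (by omega : j < a.length), List.take_succ_cons,
    List.getD_eq_getElem a 0 (by omega : j < a.length)]

-- A's inner loop, characterised
theorem pvInnerA_eq (a : List Int) (i : Nat) (acc : List Int) :
    pvInnerA a (i : Int) acc = acc ++ pvSeg a i := by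
  unfold pvInnerA pvSeg
  by_cases hm : a.length ≤ i + 1
  · rw [PySem.List.pyRange_one_eq_nil (by simp [PySem.List.len_eq]; omega)]
    rcases Nat.eq_zero_or_pos i with hi | hi
    · subst hi
      simp [show a.length - 0 - 1 = 0 by omega]
    · simp only [List.foldl_nil, if_neg (by omega : ¬ i = 0)]
      simp [show a.length - i - 1 = 0 by omega]
  · push_neg at hm
    have hcast : PySem.List.len a - (i : Int) - 1 = ((a.length - i - 1 : Nat) : Int) := by
      simp [PySem.List.len_eq]; omega
    rw [hcast, PySem.List.pyRange_one 0 ((a.length - i - 1 : Nat) : Int)]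
    simp only [sub_zero, Int.toNat_natCast, List.foldl_map, zero_add]
    rcases Nat.eq_zero_or_pos i with hi | hi
    · subst hi
      rw [PySem.List.foldl_congr_mem' (g := fun acc2 (_ : Nat) => acc2)
        (h := by
          intro j hj acc2
          simp [PySem.List.slice_natCast])]
      simp [PySem.List.foldl_ignore]
    · obtain ⟨c, rfl⟩ : ∃ c, i = c + 1 := ⟨i - 1, by omega⟩
      rw [PySem.List.foldl_congr_mem'
        (g := fun acc2 (j : Nat) => acc2 ++ [pvW a c j])
        (h := by
          intro j hj acc2
          rw [List.mem_range] at hj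
          have hjc : j + c < a.length := by omega
          have e1 : (((c + 1 : Nat) : Int) + (j : Int)) = ((j : Int) + (((c + 1 : Nat)) : Int)) := by
            ring
          simp only [e1, PySem.List.slice_natCast_add, pvSlice_cons a c j hjc,
            PySem.List.max?_id_cons, PySem.List.len_eq]
          simp [pvW]
          omega)]
      rw [PySem.List.foldl_append_singleton_eq_map]
      simp only [if_neg (by omega : ¬ c + 1 = 0), Nat.add_sub_cancel]

-- pvSeg, characterised
theorem pvSeg_zero (a : List Int) : pvSeg a 0 = [] := by simp [pvSeg]

theorem pvSeg_succ (a : List Int) (k : Nat) :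
    pvSeg a (k + 1) = (List.range (a.length - k - 2)).map (pvW a k) := by
  unfold pvSeg
  rw [if_neg (Nat.succ_ne_zero k)]
  rw [show a.length - (k + 1) - 1 = a.length - k - 2 from by omega, Nat.add_sub_cancel]

theorem pvSeg_top (a : List Int) (q : Nat) (h : a.length ≤ q + 1) : pvSeg a q = [] := by
  unfold pvSeg
  rw [show a.length - q - 1 = 0 from by omega]
  simp

-- flatMap over all window lengths collapses to pvSpecT (lengths 0 and ≥ len-1 emit nothing)
theorem pvFlat_eq (a : List Int) :
    (List.range a.length).flatMap (pvSeg a) = pvSpecT a := by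
  unfold pvSpecT
  by_cases h2 : a.length ≤ 1
  · rw [show a.length - 2 = 0 from by omega]
    simp only [List.range_zero, List.flatMap_nil]
    rw [List.flatMap_eq_nil_iff]
    intro k hk
    rw [List.mem_range] at hk
    exact pvSeg_top a k (by omega)
  · obtain ⟨p, hp⟩ : ∃ p, a.length = p + 2 := ⟨a.length - 2, by omega⟩
    rw [hp, Nat.add_sub_cancel, List.range_succ, List.flatMap_append,
      List.flatMap_singleton, pvSeg_top a (p + 1) (by omega), List.append_nil,
      List.range_succ_eq_map, List.flatMap_cons, pvSeg_zero, List.nil_append,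
      List.flatMap_map]
    have e : (fun k : Nat => pvSeg a (k + 1)) = fun k => (List.range (p + 2 - k - 2)).map (pvW a k) := by
      funext k
      rw [pvSeg_succ]
      congr 2
      omega
    simp only [Nat.succ_eq_add_one]
    rw [e]

theorem pvTransA_eq (a : List Int) : pvTransA a = pvSpecT a := by
  unfold pvTransA
  rw [show PySem.List.len a = ((a.length : Nat) : Int) from by simp [PySem.List.len_eq]]
  rw [PySem.List.pyRange_one 0 (a.length : Int)]
  simp only [sub_zero, Int.toNat_natCast, List.foldl_map, zero_add]
  rw [PySem.List.foldl_congr_mem' (g := fun acc (i : Nat) => acc ++ pvSeg a i)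
    (h := by intro i _ acc; exact pvInnerA_eq a i acc)]
  rw [PySem.List.foldl_append_eq_flatMap]
  rw [List.nil_append]
  exact pvFlat_eq a

-- B's loop invariant: after lengths 1..c, out holds the first c segments and win the row c
theorem pvB_inv (a : List Int) (c : Nat) (hc : c + 2 ≤ a.length) :
    ((PySem.List.pyRange 1 (1 + (c : Int)) 1).foldl
      (fun (st : List Int × List Int) L =>
        (st.1 ++ PySem.List.slice st.2 none (some (PySem.List.len a - L - 1)),
         List.zipWith max st.2 (PySem.List.slice st.2 (some 1) none)))
      ([], a))
    = ((List.range c).flatMap (fun k => (List.range (a.length - k - 2)).map (pvW a k)),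
       (List.range (a.length - c)).map (pvW a c)) := by
  induction c with
  | zero =>
    rw [show (1 : Int) + ((0 : Nat) : Int) = 1 by norm_num]
    rw [PySem.List.pyRange_one_eq_nil (by omega)]
    simp [pvRow_zero]
  | succ c ih =>
    have h1 : (1 : Int) + ((c + 1 : Nat) : Int) = (1 + (c : Int)) + 1 := by push_cast; ring
    rw [h1, PySem.List.pyRange_one_succ_right (by omega), List.foldl_append,
      ih (by omega)]
    simp only [List.foldl_cons, List.foldl_nil]
    have hcast : PySem.List.len a - (1 + (c : Int)) - 1 = ((a.length - c - 2 : Nat) : Int) := by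
      simp [PySem.List.len_eq]; omega
    rw [hcast, PySem.List.slice_to_natCast, PySem.List.slice_from_one]
    rw [pvRow_step a c]
    simp only [Prod.mk.injEq]
    refine ⟨?_, by trivial⟩
    rw [List.range_succ, List.flatMap_append, List.flatMap_singleton]
    congr 1
    rw [← List.map_take, List.take_range]
    rw [show min (a.length - c - 2) (a.length - c) = a.length - c - 2 from by omega]

theorem pvTransB_eq (a : List Int) : pvTransB a = pvSpecT a := by
  unfold pvTransB pvSpecT
  by_cases hm : a.length ≤ 1
  · rw [PySem.List.pyRange_one_eq_nil (by simp [PySem.List.len_eq]; omega)]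
    simp [show a.length - 2 = 0 by omega]
  · push_neg at hm
    have h1 : PySem.List.len a - 1 = 1 + ((a.length - 2 : Nat) : Int) := by
      simp [PySem.List.len_eq]; omega
    rw [h1, pvB_inv a (a.length - 2) (by omega)]

theorem pvTrans_eq (a : List Int) : pvTransA a = pvTransB a := by
  rw [pvTransA_eq, pvTransB_eq]

-- ===== VERDICT (by name: the statement is the Claim_ definition above) =====
theorem TransformTransform_spec : Claim_equal_TransformTransform := by
  intro numbers n _
  unfold Spec_TransformTransform TransformTransform TransformTransform_alt
  simp only [pvTrans_eq]
  split <;> simp_all
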